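-- pv_equiv track=rewrite | github.com/kaloys/myCodewarsAdventure | Simple Fun #253 Cool String.py | cool_string
-- ===== SOURCE A (Python) =====
-- def cool_string(s):
--     if len(s) <= 1 and s[0].isdigit():
--         return False
--     for i in range(len(s)-1):
--         if s[i].isspace() or s[i+1].isspace(): return False
--         if s[i].isdigit() or s[i+1].isdigit(): return False
--         if s[i].isupper() and s[i+1].isupper(): return False
--         if s[i].islower() and s[i+1].islower(): return False
--     return True
-- ===== SOURCE B (Python) =====
-- def cool_string(s):
--     if len(s) <= 1:
--         return not s[0].isdigit()
--     cls = ''.join('U' if c.isupper() else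
--                   'l' if c.islower() else
--                   'd' if c.isdigit() else
--                   's' if c.isspace() else
--                   'o' for c in s)
--     return ('d' not in cls and 's' not in cls
--             and 'UU' not in cls and 'll' not in cls)
-- ===== Notes on version B (the rewrite author's own statement) =====
-- stated objective: alternative
-- what changed: Instead of A's indexed loop testing four predicates on each adjacent pair, B maps the string to a classification string (one class letter U/l/d/s/o per character) and decides by substring containment tests ('d' not in cls, 's' not in cls, 'UU' not in cls, 'll' not in cls).
import Mathlib
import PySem

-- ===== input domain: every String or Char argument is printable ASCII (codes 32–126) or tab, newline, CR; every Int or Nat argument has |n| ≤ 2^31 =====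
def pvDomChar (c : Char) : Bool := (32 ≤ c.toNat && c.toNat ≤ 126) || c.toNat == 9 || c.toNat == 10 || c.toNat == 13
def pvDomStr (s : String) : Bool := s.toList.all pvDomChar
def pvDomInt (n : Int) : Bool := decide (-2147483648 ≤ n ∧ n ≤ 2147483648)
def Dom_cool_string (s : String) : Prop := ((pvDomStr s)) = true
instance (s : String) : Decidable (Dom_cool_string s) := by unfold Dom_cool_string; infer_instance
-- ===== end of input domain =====

-- B replaces A's indexed pair-scan loop by mapping each char to a class letter (U/l/d/s/o)
-- and deciding by substring containment tests on the classification string; equal on non-empty strings.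

-- ===== PORT A =====
-- A's `for i in range(len(s)-1)` with early returns, as recursion over adjacent pairs
def coolLoopA : List Char → Bool
  | a :: b :: rest =>
    if PySem.Chars.isspace a || PySem.Chars.isspace b then false
    else if PySem.Chars.isdigit a || PySem.Chars.isdigit b then false
    else if PySem.Chars.isupper a && PySem.Chars.isupper b then false
    else if PySem.Chars.islower a && PySem.Chars.islower b then false
    else coolLoopA (b :: rest)
  | _ => true

def cool_string (s : String) : Bool :=
  let cs := s.toList
  -- `len(s) <= 1 and s[0].isdigit()`: s[0] is only reached when len ≤ 1; Pre_ excludes the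
  -- empty string, where Python raises IndexError, so headD's default is never observed.
  if cs.length ≤ 1 && PySem.Chars.isdigit (cs.headD ' ') then false
  else coolLoopA cs

-- ===== PORT B =====
-- Source B's per-char classification: 'U' upper, 'l' lower, 'd' digit, 's' space, 'o' other
def classify (c : Char) : Char :=
  if PySem.Chars.isupper c then 'U'
  else if PySem.Chars.islower c then 'l'
  else if PySem.Chars.isdigit c then 'd'
  else if PySem.Chars.isspace c then 's'
  else 'o'

def cool_string_alt (s : String) : Bool :=
  let cs := s.toList
  if cs.length ≤ 1 then !PySem.Chars.isdigit (cs.headD ' ')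
  else
    let cls := cs.map classify
    !PySem.Chars.isIn ['d'] cls && !PySem.Chars.isIn ['s'] cls &&
      !PySem.Chars.isIn ['U', 'U'] cls && !PySem.Chars.isIn ['l', 'l'] cls

-- ===== PRECONDITION & SPEC =====
-- Pre_ excludes only the empty string, where A (and B) raise IndexError at s[0].
def Pre_cool_string (s : String) : Prop := s ≠ ""
instance (s : String) : Decidable (Pre_cool_string s) := by unfold Pre_cool_string; infer_instance
def pvWitness_cool_string : String := "aB"

def Spec_cool_string (s : String) (out : Bool) : Prop := out = cool_string_alt s
instance (s : String) (out : Bool) : Decidable (Spec_cool_string s out) := by unfold Spec_cool_string; infer_instance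

-- ===== CLAIM (what is proved, stated in full; the proofs are below) =====
def Claim_equal_cool_string : Prop := ∀ (s : String), Dom_cool_string s → Pre_cool_string s → Spec_cool_string s (cool_string s)

-- ===== LEMMAS AND PROOFS =====

def charOk (c : Char) : Bool := !(PySem.Chars.isdigit c || PySem.Chars.isspace c)
def pairOk (a b : Char) : Bool :=
  !((PySem.Chars.isupper a && PySem.Chars.isupper b) ||
    (PySem.Chars.islower a && PySem.Chars.islower b))

-- invariant: A's loop, with the head's own char-check conjoined, equals the two-pass reading
theorem coolLoopA_inv (a : Char) (rest : List Char) :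
    (coolLoopA (a :: rest) && charOk a) =
      ((a :: rest).all charOk &&
        ((a :: rest).zip rest).all (fun p => pairOk p.1 p.2)) := by
  induction rest generalizing a with
  | nil => simp [coolLoopA, charOk]
  | cons b rest ih =>
    by_cases hsa : PySem.Chars.isspace a
    · simp [coolLoopA, hsa, charOk]
    · by_cases hsb : PySem.Chars.isspace b
      · simp [coolLoopA, hsa, hsb, charOk]
      · by_cases hda : PySem.Chars.isdigit a
        · simp [coolLoopA, hsa, hsb, hda, charOk]
        · by_cases hdb : PySem.Chars.isdigit b
          · simp [coolLoopA, hsa, hsb, hda, hdb, charOk]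
          · by_cases hub : (PySem.Chars.isupper a && PySem.Chars.isupper b) = true
            · rcases Bool.and_eq_true_iff.mp hub with ⟨h1, h2⟩
              simp [coolLoopA, hsa, hsb, hda, hdb, h1, h2, charOk, pairOk]
            · by_cases hlb : (PySem.Chars.islower a && PySem.Chars.islower b) = true
              · rcases Bool.and_eq_true_iff.mp hlb with ⟨h1, h2⟩
                simp [coolLoopA, hsa, hsb, hda, hdb, hub, h1, h2, charOk, pairOk]
              · have hca : charOk a = true := by simp [charOk, hsa, hda]
                have hcb : charOk b = true := by simp [charOk, hsb, hdb]
                have hpab : pairOk a b = true := by simp [pairOk, hub, hlb]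
                have h2 := ih b
                rw [hcb, Bool.and_true] at h2
                simp [coolLoopA, hsa, hsb, hda, hdb, hub, hlb, hca, hcb, hpab, h2]

theorem coolLoopA_two (a b : Char) (rest : List Char) :
    coolLoopA (a :: b :: rest) =
      ((a :: b :: rest).all charOk &&
        ((a :: b :: rest).zip (b :: rest)).all (fun p => pairOk p.1 p.2)) := by
  rw [← coolLoopA_inv]
  by_cases h : charOk a
  · simp [h]
  · have : coolLoopA (a :: b :: rest) = false := by
      simp only [charOk, Bool.not_eq_true', Bool.not_eq_false] at h
      simp only [coolLoopA]
      split_ifs with h1 h2 h3 h4 <;> simp_all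
    simp [this]

-- character-class exclusivity facts (the ASCII code ranges are disjoint)
theorem digit_excl (c : Char) (h : PySem.Chars.isdigit c = true) :
    PySem.Chars.isupper c = false ∧ PySem.Chars.islower c = false := by
  simp only [PySem.Chars.isdigit, PySem.Chars.isupper, PySem.Chars.islower, Char.le_def,
    UInt32.le_iff_toNat_le, Bool.and_eq_true, decide_eq_true_eq, Bool.and_eq_false_iff,
    decide_eq_false_iff_not, not_le,
    show ('0'.val.toNat = 48) from rfl, show ('9'.val.toNat = 57) from rfl,
    show ('A'.val.toNat = 65) from rfl, show ('Z'.val.toNat = 90) from rfl,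
    show ('a'.val.toNat = 97) from rfl, show ('z'.val.toNat = 122) from rfl] at h ⊢
  omega

theorem space_excl (c : Char) (h : PySem.Chars.isspace c = true) :
    PySem.Chars.isupper c = false ∧ PySem.Chars.islower c = false ∧
      PySem.Chars.isdigit c = false := by
  simp only [PySem.Chars.isdigit, PySem.Chars.isupper, PySem.Chars.islower, PySem.Chars.isspace,
    Char.le_def, UInt32.le_iff_toNat_le, Bool.and_eq_true, Bool.or_eq_true, Bool.and_eq_false_iff,
    decide_eq_true_eq, decide_eq_false_iff_not, not_le, Char.toNat,
    show ('0'.val.toNat = 48) from rfl, show ('9'.val.toNat = 57) from rfl,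
    show ('A'.val.toNat = 65) from rfl, show ('Z'.val.toNat = 90) from rfl,
    show ('a'.val.toNat = 97) from rfl, show ('z'.val.toNat = 122) from rfl] at h ⊢
  omega

theorem lower_excl (c : Char) (h : PySem.Chars.islower c = true) :
    PySem.Chars.isupper c = false := by
  simp only [PySem.Chars.isupper, PySem.Chars.islower, Char.le_def,
    UInt32.le_iff_toNat_le, Bool.and_eq_true, decide_eq_true_eq, Bool.and_eq_false_iff,
    decide_eq_false_iff_not, not_le,
    show ('A'.val.toNat = 65) from rfl, show ('Z'.val.toNat = 90) from rfl,
    show ('a'.val.toNat = 97) from rfl, show ('z'.val.toNat = 122) from rfl] at h ⊢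
  omega

theorem classify_d (c : Char) : classify c = 'd' ↔ PySem.Chars.isdigit c = true := by
  unfold classify
  split_ifs with h1 h2 h3 h4
  · simp only [show ('U' = 'd') ↔ False by decide, false_iff]
    intro hd; simp [(digit_excl c hd).1] at h1
  · simp only [show ('l' = 'd') ↔ False by decide, false_iff]
    intro hd; simp [(digit_excl c hd).2] at h2
  · simp [h3]
  · simp [h3]
  · simp [h3]

theorem classify_s (c : Char) : classify c = 's' ↔ PySem.Chars.isspace c = true := by
  unfold classify
  split_ifs with h1 h2 h3 h4
  · simp only [show ('U' = 's') ↔ False by decide, false_iff]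
    intro hs; simp [(space_excl c hs).1] at h1
  · simp only [show ('l' = 's') ↔ False by decide, false_iff]
    intro hs; simp [(space_excl c hs).2.1] at h2
  · simp only [show ('d' = 's') ↔ False by decide, false_iff]
    intro hs; simp [(space_excl c hs).2.2] at h3
  · simp [h4]
  · simp [h4]

theorem classify_U (c : Char) : classify c = 'U' ↔ PySem.Chars.isupper c = true := by
  unfold classify
  split_ifs with h1 h2 h3 h4 <;> simp [h1]

theorem classify_low (c : Char) : classify c = 'l' ↔ PySem.Chars.islower c = true := by
  unfold classify
  split_ifs with h1 h2 h3 h4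
  · simp only [show ('U' = 'l') ↔ False by decide, false_iff]
    intro hl; simp [lower_excl c hl] at h1
  · simp [h2]
  · simp [h2]
  · simp [h2]
  · simp [h2]

-- singleton substring containment is membership
theorem singleton_infix_iff (x : Char) (l : List Char) : [x] <:+: l ↔ x ∈ l := by
  constructor
  · intro h
    exact h.sublist.subset (List.mem_singleton_self x)
  · intro h
    obtain ⟨s, t, rfl⟩ := List.append_of_mem h
    exact ⟨s, t, by simp⟩

-- a two-char substring occurs iff some adjacent pair matches it
theorem pair_infix_iff (x y : Char) (l : List Char) :
    [x, y] <:+: l ↔ ∃ p ∈ l.zip l.tail, p.1 = x ∧ p.2 = y := by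
  induction l with
  | nil => simp
  | cons a l ih =>
    rw [List.infix_cons_iff, ih]
    cases l with
    | nil => simp [List.IsPrefix]
    | cons b l' =>
      constructor
      · rintro (hp | ⟨p, hp, h1, h2⟩)
        · rw [List.cons_prefix_cons] at hp
          obtain ⟨hxa, hp⟩ := hp
          exact ⟨(a, b), by simp, hxa.symm, ((List.cons_prefix_cons.mp hp).1).symm⟩
        · exact ⟨p, by simp_all, h1, h2⟩
      · rintro ⟨p, hp, h1, h2⟩
        simp only [List.tail_cons, List.zip_cons_cons, List.mem_cons] at hp
        rcases hp with rfl | hp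
        · left
          simp only at h1 h2
          rw [List.cons_prefix_cons]
          exact ⟨h1.symm, by rw [List.cons_prefix_cons]; exact ⟨h2.symm, List.nil_prefix⟩⟩
        · right; exact ⟨p, hp, h1, h2⟩

-- B's first two containment tests are the per-character pass
theorem chars_eq (cs : List Char) :
    (!PySem.Chars.isIn ['d'] (cs.map classify) && !PySem.Chars.isIn ['s'] (cs.map classify)) =
      cs.all charOk := by
  rw [Bool.eq_iff_iff]
  simp only [Bool.and_eq_true, Bool.not_eq_true', ← Bool.not_eq_true,
    PySem.Chars.isIn_iff_infix, singleton_infix_iff, List.mem_map, List.all_eq_true]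
  constructor
  · rintro ⟨hd, hs⟩ c hc
    simp only [charOk, Bool.not_eq_true', Bool.or_eq_false_iff]
    constructor
    · by_contra h
      exact hd ⟨c, hc, (classify_d c).mpr (by simpa using h)⟩
    · by_contra h
      exact hs ⟨c, hc, (classify_s c).mpr (by simpa using h)⟩
  · intro h
    constructor
    · rintro ⟨c, hc, hcd⟩
      have := h c hc
      rw [(classify_d c)] at hcd
      simp [charOk, hcd] at this
    · rintro ⟨c, hc, hcs⟩
      have := h c hc
      rw [(classify_s c)] at hcs
      simp [charOk, hcs] at this

-- B's last two containment tests are the adjacent-pair pass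
theorem pairs_eq (cs : List Char) :
    (!PySem.Chars.isIn ['U', 'U'] (cs.map classify) &&
        !PySem.Chars.isIn ['l', 'l'] (cs.map classify)) =
      (cs.zip cs.tail).all (fun p => pairOk p.1 p.2) := by
  rw [Bool.eq_iff_iff]
  have htail : (cs.map classify).tail = cs.tail.map classify := by
    cases cs <;> simp
  simp only [Bool.and_eq_true, Bool.not_eq_true', ← Bool.not_eq_true,
    PySem.Chars.isIn_iff_infix, pair_infix_iff, htail, List.zip_map, List.mem_map,
    List.all_eq_true]
  constructor
  · rintro ⟨hU, hl⟩ p hp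
    simp only [pairOk, Bool.not_eq_true', Bool.or_eq_false_iff, Bool.and_eq_false_iff]
    constructor
    · by_cases h1 : PySem.Chars.isupper p.1 = true
      · by_cases h2 : PySem.Chars.isupper p.2 = true
        · exact absurd ⟨(classify p.1, classify p.2), ⟨p, hp, rfl⟩,
            (classify_U p.1).mpr h1, (classify_U p.2).mpr h2⟩ hU
        · right; simpa using h2
      · left; simpa using h1
    · by_cases h1 : PySem.Chars.islower p.1 = true
      · by_cases h2 : PySem.Chars.islower p.2 = true
        · exact absurd ⟨(classify p.1, classify p.2), ⟨p, hp, rfl⟩,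
            (classify_low p.1).mpr h1, (classify_low p.2).mpr h2⟩ hl
        · right; simpa using h2
      · left; simpa using h1
  · intro h
    constructor
    · rintro ⟨q, ⟨p, hp, rfl⟩, h1, h2⟩
      have := h p hp
      rw [Prod.map] at h1 h2
      simp only [classify_U] at h1 h2
      simp [pairOk, h1, h2] at this
    · rintro ⟨q, ⟨p, hp, rfl⟩, h1, h2⟩
      have := h p hp
      rw [Prod.map] at h1 h2
      simp only [classify_low] at h1 h2
      simp [pairOk, h1, h2] at this

-- ===== VERDICT (by name: the statement is the Claim_ definition above) =====
theorem cool_string_spec : Claim_equal_cool_string := by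
  intro s _ hpre
  unfold Spec_cool_string cool_string cool_string_alt
  have hne : s.toList ≠ [] := by
    intro h
    exact hpre (String.toList_eq_nil_iff.mp h)
  cases hcs : s.toList with
  | nil => exact absurd hcs hne
  | cons a rest =>
    cases rest with
    | nil =>
      by_cases h : PySem.Chars.isdigit a <;> simp [h, coolLoopA]
    | cons b rest' =>
      simp only [List.length_cons]
      have hlen : ¬ (rest'.length + 1 + 1 ≤ 1) := by omega
      simp only [hlen, decide_false, Bool.false_and, Bool.false_eq_true, if_false]
      have hp := pairs_eq (a :: b :: rest')
      simp only [List.tail_cons] at hp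
      rw [coolLoopA_two, ← chars_eq, ← hp]
      ac_rfl
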